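-- pv_equiv track=rewrite | github.com/bkmandge/Interview-Preparation | Interview_ques/count the number of common subsequences in two strings.py | count_common_subsequences
-- ===== SOURCE A (Python) =====
-- def count_common_subsequences(s1, s2):
--     m = len(s1)
--     n = len(s2)
--
--     # Create a 2D array to store count of common subsequences
--     mat = [[0] * (n + 1) for _ in range(m + 1)]
--
--     # Initialize the first row and column with 0
--     for j in range(n + 1):
--         mat[0][j] = 0
--     for i in range(m + 1):
--         mat[i][0] = 0
--
--     # Populate the mat table
--     for i in range(m):  # to consider prefixes of s1
--         for j in range(n):  # to consider prefixes of s2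
--             if s1[i] == s2[j]:
--                 mat[i + 1][j + 1] = mat[i][j] + mat[i][j + 1] + 1
--             else:
--                 mat[i + 1][j + 1] =  mat[i][j + 1] + 1
--
--     # Return the count of common subsequences
--     return mat[m][n]
-- ===== SOURCE B (Python) =====
-- def count_common_subsequences(s1, s2):
--     # Top-down: memoized recursion over shrinking prefixes instead of
--     # filling a bottom-up (m+1) x (n+1) table.
--     memo = {}
--
--     def f(i, j):
--         if i == 0 or j == 0:
--             return 0
--         if (i, j) in memo:
--             return memo[(i, j)]
--         v = f(i - 1, j) + 1
--         if s1[i - 1] == s2[j - 1]: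
--             v += f(i - 1, j - 1)
--         memo[(i, j)] = v
--         return v
--
--     return f(len(s1), len(s2))
-- ===== Notes on version B (the rewrite author's own statement) =====
-- stated objective: alternative
-- what changed: Replaced the bottom-up (m+1)x(n+1) table fill (with its redundant zero-initialisation loops) by a top-down recursive helper f(i,j) memoized in a dict, evaluating the recurrence on demand over shrinking prefixes.
import Mathlib
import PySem

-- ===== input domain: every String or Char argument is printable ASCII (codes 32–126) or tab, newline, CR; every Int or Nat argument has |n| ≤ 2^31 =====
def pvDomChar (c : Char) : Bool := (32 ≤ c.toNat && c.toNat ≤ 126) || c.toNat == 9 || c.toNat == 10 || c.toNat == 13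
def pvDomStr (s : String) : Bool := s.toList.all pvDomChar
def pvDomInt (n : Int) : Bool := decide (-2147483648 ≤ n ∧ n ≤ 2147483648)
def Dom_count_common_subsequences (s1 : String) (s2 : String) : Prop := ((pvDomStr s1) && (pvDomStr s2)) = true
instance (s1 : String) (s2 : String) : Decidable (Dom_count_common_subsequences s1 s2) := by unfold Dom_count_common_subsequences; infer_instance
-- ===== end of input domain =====

-- B replaces A's bottom-up table fill by a top-down recursion memoized in a dict (same return values).

-- ===== PORT A =====
-- Literal port of A: build the zero matrix, run the two (no-op) zero-initialisation
-- loops, fill the table with the nested index loops, return mat[m][n].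
def count_common_subsequences (s1 : String) (s2 : String) : Int :=
  let l1 := s1.toList
  let l2 := s2.toList
  let m := l1.length
  let n := l2.length
  let mat : List (List Int) := List.replicate (m + 1) (List.replicate (n + 1) 0)
  -- for j in range(n+1): mat[0][j] = 0
  let mat := (List.range (n + 1)).foldl
    (fun mat j => mat.set 0 ((mat.getD 0 []).set j 0)) mat
  -- for i in range(m+1): mat[i][0] = 0
  let mat := (List.range (m + 1)).foldl
    (fun mat i => mat.set i ((mat.getD i []).set 0 0)) mat
  -- nested fill loops
  let mat := (List.range m).foldl (fun mat i =>
    (List.range n).foldl (fun mat j =>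
      let v : Int :=
        if l1.getD i ' ' = l2.getD j ' ' then
          (mat.getD i []).getD j 0 + (mat.getD i []).getD (j + 1) 0 + 1
        else
          (mat.getD i []).getD (j + 1) 0 + 1
      mat.set (i + 1) ((mat.getD (i + 1) []).set (j + 1) v)) mat) mat
  (mat.getD m []).getD n 0

-- ===== PORT B =====
-- the nested helper f(i, j) of Source B: if i==0 or j==0 return 0; memo lookup;
-- v = f(i-1, j) + 1 (+ f(i-1, j-1) on a character match); store and return v.
-- The memo dict is threaded through the calls; both recursive calls are at i-1,
-- so this is structural recursion on i.
def ccsF (l1 l2 : List Char) : Nat → Nat → PySem.Dict (Int × Int) Int → Int × PySem.Dict (Int × Int) Int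
  | 0, _, memo => (0, memo)
  | _ + 1, 0, memo => (0, memo)
  | i + 1, j + 1, memo =>
    match memo.get? (((i + 1 : Nat) : Int), ((j + 1 : Nat) : Int)) with
    | some v => (v, memo)
    | none =>
      let p := ccsF l1 l2 i (j + 1) memo
      let q :=
        if l1.getD i ' ' = l2.getD j ' ' then
          let r := ccsF l1 l2 i j p.2
          (p.1 + 1 + r.1, r.2)
        else (p.1 + 1, p.2)
      (q.1, q.2.insert (((i + 1 : Nat) : Int), ((j + 1 : Nat) : Int)) q.1)

def count_common_subsequences_alt (s1 : String) (s2 : String) : Int :=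
  (ccsF s1.toList s2.toList s1.toList.length s2.toList.length PySem.Dict.empty).1

-- ===== PRECONDITION & SPEC =====
def Spec_count_common_subsequences (s1 : String) (s2 : String) (out : Int) : Prop := out = count_common_subsequences_alt s1 s2
instance (s1 : String) (s2 : String) (out : Int) : Decidable (Spec_count_common_subsequences s1 s2 out) := by unfold Spec_count_common_subsequences; infer_instance

-- ===== CLAIM (what is proved, stated in full; the proofs are below) =====
def Claim_equal_count_common_subsequences : Prop := ∀ (s1 : String) (s2 : String), Dom_count_common_subsequences s1 s2 → Spec_count_common_subsequences s1 s2 (count_common_subsequences s1 s2)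

-- ===== LEMMAS AND PROOFS =====

-- the pure recurrence both programs compute
def ccsG (l1 l2 : List Char) : Nat → Nat → Int
  | 0, _ => 0
  | _ + 1, 0 => 0
  | i + 1, j + 1 =>
    ccsG l1 l2 i (j + 1) + 1 + (if l1.getD i ' ' = l2.getD j ' ' then ccsG l1 l2 i j else 0)

-- ---- B side: the memoized recursion computes ccsG ----

theorem pvKeyEq (a b i j : Nat) (h : (((a : Nat) : Int), ((b : Nat) : Int)) = (((i : Nat) : Int), ((j : Nat) : Int))) :
    a = i ∧ b = j := by
  have h1 : ((a : Nat) : Int) = ((i : Nat) : Int) := congrArg Prod.fst h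
  have h2 : ((b : Nat) : Int) = ((j : Nat) : Int) := congrArg Prod.snd h
  omega

def ccsInv (l1 l2 : List Char) (memo : PySem.Dict (Int × Int) Int) : Prop :=
  ∀ (i j : Nat) (v : Int), memo.get? (((i : Nat) : Int), ((j : Nat) : Int)) = some v → v = ccsG l1 l2 i j

theorem ccsF_correct (l1 l2 : List Char) :
    ∀ (i j : Nat) (memo : PySem.Dict (Int × Int) Int), ccsInv l1 l2 memo →
      (ccsF l1 l2 i j memo).1 = ccsG l1 l2 i j ∧ ccsInv l1 l2 (ccsF l1 l2 i j memo).2 := by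
  intro i
  induction i with
  | zero =>
    intro j memo h
    exact ⟨by cases j <;> simp [ccsF, ccsG], by cases j <;> simpa [ccsF] using h⟩
  | succ i ih =>
    intro j memo h
    cases j with
    | zero => exact ⟨by simp [ccsF, ccsG], by simpa [ccsF] using h⟩
    | succ j =>
      rw [ccsF]
      cases hget : memo.get? (((i + 1 : Nat) : Int), ((j + 1 : Nat) : Int)) with
      | some v =>
        exact ⟨h (i + 1) (j + 1) v hget, h⟩
      | none =>
        obtain ⟨h1v, h1inv⟩ := ih (j + 1) memo h
        by_cases hc : l1.getD i ' ' = l2.getD j ' '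
        · obtain ⟨h2v, h2inv⟩ := ih j (ccsF l1 l2 i (j + 1) memo).2 h1inv
          simp only [if_pos hc]
          have hval : (ccsF l1 l2 i (j + 1) memo).1 + 1 + (ccsF l1 l2 i j (ccsF l1 l2 i (j + 1) memo).2).1
              = ccsG l1 l2 (i + 1) (j + 1) := by
            rw [h1v, h2v, ccsG, if_pos hc]
          refine ⟨hval, ?_⟩
          intro a b w hw
          rw [PySem.Dict.get?_insert] at hw
          split_ifs at hw with heq
          · obtain ⟨ha, hb⟩ := pvKeyEq a b (i + 1) (j + 1) heq
            subst ha; subst hb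
            rw [← hval]
            exact (Option.some.injEq _ _ ▸ hw).symm ▸ rfl
          · exact h2inv a b w hw
        · simp only [if_neg hc]
          have hval : (ccsF l1 l2 i (j + 1) memo).1 + 1 = ccsG l1 l2 (i + 1) (j + 1) := by
            rw [h1v, ccsG, if_neg hc]; ring
          refine ⟨hval, ?_⟩
          intro a b w hw
          rw [PySem.Dict.get?_insert] at hw
          split_ifs at hw with heq
          · obtain ⟨ha, hb⟩ := pvKeyEq a b (i + 1) (j + 1) heq
            subst ha; subst hb
            rw [← hval]
            exact (Option.some.injEq _ _ ▸ hw).symm ▸ rfl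
          · exact h1inv a b w hw

theorem ccsInv_empty (l1 l2 : List Char) : ccsInv l1 l2 PySem.Dict.empty := by
  intro i j v hv
  simp [PySem.Dict.get?_empty] at hv

-- ---- A side: getD/set bookkeeping helpers ----

theorem pvGetD_set_ne {α : Type} (l : List α) (i j : Nat) (a d : α) (h : i ≠ j) :
    (l.set i a).getD j d = l.getD j d := by
  simp [List.getD, List.getElem?_set_ne h]

theorem pvGetD_set_self {α : Type} (l : List α) (i : Nat) (a d : α) (h : i < l.length) :
    (l.set i a).getD i d = a := by
  simp [List.getD, h]

theorem pvGetD_eq_getElem {α : Type} (l : List α) (i : Nat) (d : α) (h : i < l.length) :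
    l.getD i d = l[i] := by
  simp [List.getD, List.getElem?_eq_getElem h]

theorem pvSet_getD_self {α : Type} (l : List α) (i : Nat) (d : α) (h : i < l.length) :
    l.set i (l.getD i d) = l := by
  rw [pvGetD_eq_getElem l i d h]; exact List.set_getElem_self h

theorem pvSet_append_len (xs ys : List Int) (v : Int) (j : Nat) (h : xs.length = j) :
    (xs ++ ys).set j v = xs ++ ys.set 0 v := by
  subst h
  induction xs with
  | nil => simp
  | cons x xs ih => simp [ih]

-- the inner loop of A, run on a fresh zero row, produces 0 :: N
theorem pvInnerFold (n : Nat) (N : List Int) (a : Nat → Int) (hN : N.length = n)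
    (ha : ∀ j, j < n → a j = N.getD j 0) :
    ∀ j, j ≤ n →
      (List.range j).foldl (fun r jj => r.set (jj + 1) (a jj)) (List.replicate (n + 1) 0)
        = 0 :: (N.take j ++ List.replicate (n - j) 0) := by
  intro j
  induction j with
  | zero => intro _; simp [List.replicate_succ]
  | succ j ih =>
    intro hj
    have hjn : j < n := hj
    rw [List.range_succ, List.foldl_append, ih (Nat.le_of_lt hjn)]
    simp only [List.foldl_cons, List.foldl_nil, List.set_cons_succ]
    have hlen : (N.take j).length = j := List.length_take_of_le (by omega)
    rw [pvSet_append_len _ _ _ _ hlen]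
    have hrep : (List.replicate (n - j) (0 : Int)).set 0 (a j)
        = a j :: List.replicate (n - (j + 1)) 0 := by
      have h1 : n - j = (n - (j + 1)) + 1 := by omega
      rw [h1]; simp [List.replicate_succ]
    have htake : N.take (j + 1) = N.take j ++ [a j] := by
      rw [List.take_add_one, List.getElem?_eq_getElem (by omega : j < N.length)]
      rw [ha j hjn, pvGetD_eq_getElem N j 0 (by omega)]
      simp
    rw [hrep, htake]
    simp

-- the inner matrix loop only reads row i and writes row i+1, so it factors
theorem pvMatFactor (i : Nat) (g : List Int → Nat → Int) :
    ∀ (k : Nat) (mat : List (List Int)), i + 1 < mat.length →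
      (List.range k).foldl
          (fun mat jj => mat.set (i + 1) ((mat.getD (i + 1) []).set (jj + 1) (g (mat.getD i []) jj))) mat
        = mat.set (i + 1)
            ((List.range k).foldl (fun r jj => r.set (jj + 1) (g (mat.getD i []) jj)) (mat.getD (i + 1) [])) := by
  intro k
  induction k with
  | zero =>
    intro mat h
    simp only [List.range_zero, List.foldl_nil]
    exact (pvSet_getD_self mat (i + 1) [] h).symm
  | succ k ih =>
    intro mat h
    rw [List.range_succ, List.foldl_append, List.foldl_append, ih mat h]
    simp only [List.foldl_cons, List.foldl_nil]
    rw [pvGetD_set_ne _ _ _ _ _ (by omega : i + 1 ≠ i)]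
    rw [pvGetD_set_self _ _ _ _ h]
    rw [List.set_set]

-- the two zero-initialisation loops are identities on the zero matrix
theorem pvInit1 (m n : Nat) (k : Nat) :
    (List.range k).foldl (fun mat j => mat.set 0 ((mat.getD 0 []).set j 0))
        (List.replicate (m + 1) (List.replicate (n + 1) (0 : Int)))
      = List.replicate (m + 1) (List.replicate (n + 1) 0) := by
  induction k with
  | zero => simp
  | succ k ih =>
    rw [List.range_succ, List.foldl_append, ih]
    simp only [List.foldl_cons, List.foldl_nil]
    rw [List.getD_replicate _ (by omega : 0 < m + 1), List.set_replicate_self,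
      List.set_replicate_self]

theorem pvInit2 (m n : Nat) :
    ∀ k, k ≤ m + 1 →
      (List.range k).foldl (fun mat i => mat.set i ((mat.getD i []).set 0 0))
          (List.replicate (m + 1) (List.replicate (n + 1) (0 : Int)))
        = List.replicate (m + 1) (List.replicate (n + 1) 0) := by
  intro k
  induction k with
  | zero => intro _; simp
  | succ k ih =>
    intro hk
    rw [List.range_succ, List.foldl_append, ih (by omega)]
    simp only [List.foldl_cons, List.foldl_nil]
    rw [List.getD_replicate _ (by omega : k < m + 1), List.set_replicate_self,
      List.set_replicate_self]

-- A's matrix after the first k outer iterations (let-free form of the port's fold)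
def pvM (l1 l2 : List Char) (k : Nat) : List (List Int) :=
  (List.range k).foldl (fun mat i =>
    (List.range l2.length).foldl (fun mat j =>
      mat.set (i + 1) ((mat.getD (i + 1) []).set (j + 1)
        (if l1.getD i ' ' = l2.getD j ' ' then
          (mat.getD i []).getD j 0 + (mat.getD i []).getD (j + 1) 0 + 1
        else
          (mat.getD i []).getD (j + 1) 0 + 1))) mat)
    (List.replicate (l1.length + 1) (List.replicate (l2.length + 1) 0))

theorem pvM_zero (l1 l2 : List Char) :
    pvM l1 l2 0 = List.replicate (l1.length + 1) (List.replicate (l2.length + 1) 0) := by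
  simp [pvM]

theorem pvM_succ (l1 l2 : List Char) (k : Nat) :
    pvM l1 l2 (k + 1)
      = (List.range l2.length).foldl (fun mat j =>
          mat.set (k + 1) ((mat.getD (k + 1) []).set (j + 1)
            (if l1.getD k ' ' = l2.getD j ' ' then
              (mat.getD k []).getD j 0 + (mat.getD k []).getD (j + 1) 0 + 1
            else
              (mat.getD k []).getD (j + 1) 0 + 1))) (pvM l1 l2 k) := by
  unfold pvM
  rw [List.range_succ, List.foldl_append]
  simp only [List.foldl_cons, List.foldl_nil]

-- row i of the recurrence, as a list
def pvRowG (l1 l2 : List Char) (i : Nat) : List Int :=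
  (List.range (l2.length + 1)).map (fun j => ccsG l1 l2 i j)

theorem pvRowG_getD (l1 l2 : List Char) (i j : Nat) (h : j < l2.length + 1) :
    (pvRowG l1 l2 i).getD j 0 = ccsG l1 l2 i j := by
  simp [pvRowG, List.getD, List.getElem?_map, List.getElem?_range h]

theorem pvRowG_zero (l1 l2 : List Char) :
    pvRowG l1 l2 0 = List.replicate (l2.length + 1) 0 := by
  simp [pvRowG, ccsG, List.map_const']

theorem pvRowG_succ (l1 l2 : List Char) (k : Nat) :
    pvRowG l1 l2 (k + 1)
      = 0 :: (List.range l2.length).map (fun j => ccsG l1 l2 (k + 1) (j + 1)) := by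
  unfold pvRowG
  rw [List.range_succ_eq_map, List.map_cons, List.map_map]
  rfl

-- main invariant: after k outer iterations, row k of A's matrix is row k of the
-- recurrence, and the rows below it are still zero
theorem pvOuter (l1 l2 : List Char) :
    ∀ k, k ≤ l1.length →
      (pvM l1 l2 k).length = l1.length + 1 ∧
      (∀ t, k < t → t < l1.length + 1 →
        (pvM l1 l2 k).getD t [] = List.replicate (l2.length + 1) 0) ∧
      (pvM l1 l2 k).getD k [] = pvRowG l1 l2 k := by
  intro k
  induction k with
  | zero =>
    intro _
    refine ⟨by rw [pvM_zero]; simp, ?_, ?_⟩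
    · intro t _ ht
      rw [pvM_zero]
      exact List.getD_replicate _ ht
    · rw [pvM_zero, pvRowG_zero]
      exact List.getD_replicate _ (by omega)
  | succ k ih =>
    intro hk
    obtain ⟨hlen, hzero, hrow⟩ := ih (by omega)
    set M := pvM l1 l2 k with hM
    set N : List Int := (List.range l2.length).map (fun j => ccsG l1 l2 (k + 1) (j + 1)) with hNdef
    have hNlen : N.length = l2.length := by simp [hNdef]
    have hNgetD : ∀ j, j < l2.length → N.getD j 0 = ccsG l1 l2 (k + 1) (j + 1) := by
      intro j hj
      simp [hNdef, List.getD, List.getElem?_map, List.getElem?_range hj]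
    have hfold : pvM l1 l2 (k + 1) = M.set (k + 1) (0 :: N) := by
      rw [pvM_succ, ← hM]
      rw [pvMatFactor k
        (fun R j => if l1.getD k ' ' = l2.getD j ' ' then
            R.getD j 0 + R.getD (j + 1) 0 + 1 else R.getD (j + 1) 0 + 1)
        l2.length M (by omega)]
      have hMk1 : M.getD (k + 1) [] = List.replicate (l2.length + 1) 0 :=
        hzero (k + 1) (by omega) (by omega)
      rw [hMk1, hrow]
      have hstep := pvInnerFold l2.length N
        (fun j => if l1.getD k ' ' = l2.getD j ' ' then
            (pvRowG l1 l2 k).getD j 0 + (pvRowG l1 l2 k).getD (j + 1) 0 + 1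
          else (pvRowG l1 l2 k).getD (j + 1) 0 + 1)
        hNlen ?_ l2.length (le_refl _)
      · rw [hstep, List.take_of_length_le (by omega), Nat.sub_self]
        simp
      · intro j hj
        simp only [hNgetD j hj, pvRowG_getD l1 l2 k j (by omega : j < l2.length + 1),
          pvRowG_getD l1 l2 k (j + 1) (by omega : j + 1 < l2.length + 1)]
        show (if l1.getD k ' ' = l2.getD j ' ' then
            ccsG l1 l2 k j + ccsG l1 l2 k (j + 1) + 1 else ccsG l1 l2 k (j + 1) + 1)
          = ccsG l1 l2 (k + 1) (j + 1)
        rw [ccsG]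
        by_cases h : l1.getD k ' ' = l2.getD j ' '
        · simp only [if_pos h]; ring
        · simp only [if_neg h]; ring
    refine ⟨?_, ?_, ?_⟩
    · rw [hfold]; simpa using hlen
    · intro t ht htm
      rw [hfold, pvGetD_set_ne _ _ _ _ _ (by omega : k + 1 ≠ t)]
      exact hzero t (by omega) htm
    · rw [hfold, pvGetD_set_self _ _ _ _ (by omega : k + 1 < M.length), pvRowG_succ, ← hNdef]

-- ===== VERDICT (by name: the statement is the Claim_ definition above) =====
theorem count_common_subsequences_spec : Claim_equal_count_common_subsequences := by
  intro s1 s2 _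
  unfold Spec_count_common_subsequences count_common_subsequences count_common_subsequences_alt
  simp only [pvInit1, pvInit2 s1.toList.length s2.toList.length (s1.toList.length + 1) (le_refl _)]
  have hinv := pvOuter s1.toList s2.toList s1.toList.length (le_refl _)
  have hA : (pvM s1.toList s2.toList s1.toList.length).getD s1.toList.length []
      = pvRowG s1.toList s2.toList s1.toList.length := hinv.2.2
  rw [show ((List.range s1.toList.length).foldl (fun mat i =>
      (List.range s2.toList.length).foldl (fun mat j =>
        let v : Int :=
          if s1.toList.getD i ' ' = s2.toList.getD j ' ' then
            (mat.getD i []).getD j 0 + (mat.getD i []).getD (j + 1) 0 + 1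
          else
            (mat.getD i []).getD (j + 1) 0 + 1
        mat.set (i + 1) ((mat.getD (i + 1) []).set (j + 1) v)) mat)
      (List.replicate (s1.toList.length + 1) (List.replicate (s2.toList.length + 1) 0)))
      = pvM s1.toList s2.toList s1.toList.length from rfl]
  rw [hA, pvRowG_getD s1.toList s2.toList s1.toList.length s2.toList.length (by omega)]
  exact ((ccsF_correct s1.toList s2.toList s1.toList.length s2.toList.length
    PySem.Dict.empty (ccsInv_empty s1.toList s2.toList)).1).symm
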